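-- pv_equiv track=rewrite | github.com/Algorithm-bbackgongdan/Almut-3rd | code/itsme-shawn/week5/boj_2589.py | find_treasure_distance
-- ===== SOURCE A (Python) =====
-- from collections import deque
--
-- def bfs(start, map, visited):
--     queue = deque([(start, 0)])  # 큐를 이용하여 BFS 수행, (좌표, 거리) 형태로 저장
--     visited[start[0]][start[1]] = True  # 방문 여부 체크
--     max_distance = 0  # 최단 거리 중 최대 거리를 저장
--
--     while queue:
--         current, distance = queue.popleft()  # 현재위치, 거리
--         max_distance = max(max_distance, distance)  # 최대 거리 갱신
--
--         for dx, dy in [(1, 0), (-1, 0), (0, 1), (0, -1)]: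
--             nx, ny = current[0] + dx, current[1] + dy  # 현재 위치에서 4방향으로 이동
--
--             # 지도 범위 내에 있고 육지(L)이며 방문하지 않았다면 큐에 추가
--             if (
--                 0 <= nx < len(map)
--                 and 0 <= ny < len(map[0])
--                 and map[nx][ny] == "L"
--                 and not visited[nx][ny]
--             ):
--                 queue.append(((nx, ny), distance + 1))  # 다음 위치와 거리를 큐에 추가
--                 visited[nx][ny] = True  # 방문 여부 표시
--
--     return max_distance
--
-- def find_treasure_distance(map):
--     max_distance = 0
--
--     # 모든 육지 지점에 대해 최단 거리를 계산하고 최대 거리를 갱신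
--     for i in range(len(map)):
--         for j in range(len(map[0])):
--             if map[i][j] == "L":
--                 visited = [[False] * len(map[0]) for _ in range(len(map))]
--                 max_distance = max(max_distance, bfs((i, j), map, visited))
--
--     return max_distance
-- ===== SOURCE B (Python) =====
-- def _adjacent_visited(visited, x, y, rows, cols):
--     for nx, ny in ((x + 1, y), (x - 1, y), (x, y + 1), (x, y - 1)):
--         if 0 <= nx < rows and 0 <= ny < cols and visited[nx][ny]:
--             return True
--     return False
--
-- def find_treasure_distance(map):
--     rows = len(map)
--     best = 0
--     for i in range(rows):
--         for j in range(len(map[0])):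
--             if map[i][j] == "L":
--                 cols = len(map[0])
--                 # Jacobi fixed-point sweeps: no queue/frontier; each round scans the
--                 # whole grid and marks every unvisited land cell adjacent to a
--                 # visited cell, counting rounds until the matrix stops changing.
--                 visited = [[False] * cols for _ in range(rows)]
--                 visited[i][j] = True
--                 level = 0
--                 for _ in range(rows * cols):
--                     new = [[visited[x][y]
--                             or (map[x][y] == "L"
--                                 and _adjacent_visited(visited, x, y, rows, cols))
--                             for y in range(cols)]
--                            for x in range(rows)]
--                     if new == visited:
--                         break
--                     visited = new
--                     level += 1
--                 best = max(best, level)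
--     return best
-- ===== Notes on version B (the rewrite author's own statement) =====
-- stated objective: alternative
-- what changed: The inner queue BFS is replaced by a queue-free Jacobi fixed-point iteration: each round rebuilds the whole visited matrix at once (marking every unvisited land cell with a visited neighbour) and the answer is the number of rounds until the matrix stops changing.
import Mathlib
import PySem

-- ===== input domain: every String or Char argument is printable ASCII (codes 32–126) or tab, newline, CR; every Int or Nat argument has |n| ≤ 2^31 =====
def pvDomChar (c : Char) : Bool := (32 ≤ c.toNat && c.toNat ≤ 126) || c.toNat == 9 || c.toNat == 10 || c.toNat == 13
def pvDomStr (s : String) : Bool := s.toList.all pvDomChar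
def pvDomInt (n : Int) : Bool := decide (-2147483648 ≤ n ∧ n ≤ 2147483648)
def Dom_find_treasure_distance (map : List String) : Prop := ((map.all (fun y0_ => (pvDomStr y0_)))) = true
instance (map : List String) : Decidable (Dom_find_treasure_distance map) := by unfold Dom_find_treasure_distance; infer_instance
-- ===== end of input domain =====

-- B replaces the inner queue BFS by a queue-free Jacobi fixed-point iteration that rebuilds the
-- whole visited matrix each round and counts rounds to the fixpoint (objective: alternative).

-- ===== shared grid helpers (exact at the guarded in-range call sites) =====

-- map[i][j] as a Char; every call site guards 0 ≤ i < len(map) and 0 ≤ j < len(map[0]) ≤ len(map[i])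
-- (the latter from Pre_), so the ' ' default is never produced there (exact under Pre_).
def cellD (map : List String) (i j : Int) : Char :=
  if 0 ≤ i ∧ 0 ≤ j then ((map.getD i.toNat "").toList.getD j.toNat ' ') else ' '

-- visited[i][j]; call sites guard the indices in range, where this is exact.
def vGet (V : List (List Bool)) (i j : Int) : Bool :=
  if 0 ≤ i ∧ 0 ≤ j then (V.getD i.toNat []).getD j.toNat true else true

-- visited[i][j] = True; call sites guard the indices in range, where this is exact.
def vSet (V : List (List Bool)) (i j : Int) : List (List Bool) :=
  if 0 ≤ i ∧ 0 ≤ j then V.set i.toNat ((V.getD i.toNat []).set j.toNat true) else V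

-- number of False entries; termination measure for A's BFS loop
def falseCount (V : List (List Bool)) : Nat := (V.map (fun r => r.count false)).sum

-- ===== PORT A =====

def dirsA : List (Int × Int) := [(1, 0), (-1, 0), (0, 1), (0, -1)]

-- the body of A's `for dx, dy in …` loop (state: queue-to-be ++ appended entries, visited)
def stepA (map : List String) (current : Int × Int) (distance : Int)
    (s : List ((Int × Int) × Int) × List (List Bool)) (dxy : Int × Int) :
    List ((Int × Int) × Int) × List (List Bool) :=
  if 0 ≤ current.1 + dxy.1 ∧ current.1 + dxy.1 < (map.length : Int) ∧
     0 ≤ current.2 + dxy.2 ∧ current.2 + dxy.2 < ((map.headD "").length : Int) ∧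
     cellD map (current.1 + dxy.1) (current.2 + dxy.2) = 'L' ∧
     vGet s.2 (current.1 + dxy.1) (current.2 + dxy.2) = false
  then (s.1 ++ [((current.1 + dxy.1, current.2 + dxy.2), distance + 1)],
        vSet s.2 (current.1 + dxy.1) (current.2 + dxy.2))
  else s

-- ===== termination lemmas (cited by the A port's decreasing_by) =====

theorem count_set_true_lt (r : List Bool) (j : Nat) (h : r.getD j true = false) :
    (r.set j true).count false < r.count false := by
  induction r generalizing j with
  | nil => simp at h
  | cons a t ih =>
    cases j with
    | zero => simp_all
    | succ j =>
      have := ih j (by simpa using h)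
      cases a <;> simpa [List.count_cons] using this

theorem sum_set_lt (l : List Nat) (i : Nat) (x : Nat) (hx : x < l.getD i 0) :
    (l.set i x).sum < l.sum := by
  induction l generalizing i with
  | nil => simp at hx
  | cons a t ih =>
    cases i with
    | zero => simp at hx ⊢; omega
    | succ i =>
      have := ih i (by simpa using hx)
      simp at this ⊢; omega

theorem falseCount_vSet_lt (V : List (List Bool)) (i j : Int)
    (h : vGet V i j = false) : falseCount (vSet V i j) < falseCount V := by
  unfold vGet at h
  unfold vSet falseCount
  split_ifs with hij
  · rw [if_pos hij] at h
    have hi : i.toNat < V.length := by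
      by_contra hi
      rw [List.getD_eq_getElem?_getD (l := V), List.getElem?_eq_none (by omega)] at h
      simp at h
    rw [List.map_set]
    apply sum_set_lt
    have hm : (V.map (fun r => r.count false)).getD i.toNat 0 =
        ((V.getD i.toNat []).count false) := by
      rw [List.getD_eq_getElem?_getD, List.getD_eq_getElem?_getD,
          List.getElem?_map, List.getElem?_eq_getElem hi]
      simp
    rw [hm]
    exact count_set_true_lt _ _ h
  · rw [if_neg hij] at h; simp at h

-- generic fold fact: if every step either keeps the state or strictly lowers falseCount,
-- so does the whole fold (used by the loops' decreasing_by)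
theorem foldl_state_cases {α σ : Type} (st : σ → α → σ) (fc : σ → Nat)
    (h : ∀ s x, st s x = s ∨ fc (st s x) < fc s) :
    ∀ (ds : List α) (s : σ), List.foldl st s ds = s ∨ fc (List.foldl st s ds) < fc s := by
  have mono : ∀ (ds : List α) (s : σ), fc (List.foldl st s ds) ≤ fc s := by
    intro ds
    induction ds with
    | nil => intro s; simp
    | cons d t ih =>
      intro s
      rcases h s d with h1 | h1
      · simpa [h1] using ih (st s d)
      · calc fc (List.foldl st (st s d) t) ≤ fc (st s d) := ih _
          _ ≤ fc s := Nat.le_of_lt h1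
  intro ds
  induction ds with
  | nil => intro s; left; rfl
  | cons d t ih =>
    intro s
    rcases h s d with h1 | h1
    · rw [List.foldl_cons, h1]; exact ih s
    · right
      calc fc (List.foldl st (st s d) t) ≤ fc (st s d) := mono t _
        _ < fc s := h1

theorem stepA_cases (map : List String) (c : Int × Int) (d : Int) :
    ∀ (s : List ((Int × Int) × Int) × List (List Bool)) (dxy : Int × Int),
      stepA map c d s dxy = s ∨ falseCount (stepA map c d s dxy).2 < falseCount s.2 := by
  intro s dxy
  unfold stepA
  split_ifs with h
  · right; exact falseCount_vSet_lt _ _ _ h.2.2.2.2.2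
  · left; rfl

def bfsLoop (map : List String) (queue : List ((Int × Int) × Int))
    (visited : List (List Bool)) (max_distance : Int) : Int :=
  match queue with
  | [] => max_distance
  | (current, distance) :: rest =>
    let md := max max_distance distance
    let s := dirsA.foldl (stepA map current distance) (rest, visited)
    bfsLoop map s.1 s.2 md
termination_by (falseCount visited, queue.length)
decreasing_by
  rcases foldl_state_cases (stepA map current distance) (fun s2 => falseCount s2.2)
      (stepA_cases map current distance) dirsA (rest, visited) with h | h
  · rw [h]; exact Prod.Lex.right _ (by simp)
  · exact Prod.Lex.left _ _ h

def bfsA (start : Int × Int) (map : List String) (visited : List (List Bool)) : Int :=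
  bfsLoop map [(start, 0)] (vSet visited start.1 start.2) 0

def find_treasure_distance (map : List String) : Int :=
  (PySem.List.pyRange 0 (map.length : Int) 1).foldl (fun md i =>
    (PySem.List.pyRange 0 ((map.headD "").length : Int) 1).foldl (fun md j =>
      if cellD map i j = 'L' then
        max md (bfsA (i, j) map
          (List.replicate map.length (List.replicate (map.headD "").length false)))
      else md) md) 0

-- ===== PORT B =====

-- the tuple ((x+1,y),(x-1,y),(x,y+1),(x,y-1)) iterated by B's helper
def nbrs (c : Int × Int) : List (Int × Int) :=
  [(c.1 + 1, c.2), (c.1 - 1, c.2), (c.1, c.2 + 1), (c.1, c.2 - 1)]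

-- B's `_adjacent_visited`: the for/early-return is `any` over the four candidates
def adjacent_visited (visited : List (List Bool)) (x y rows cols : Int) : Bool :=
  (nbrs (x, y)).any (fun n =>
    decide (0 ≤ n.1 ∧ n.1 < rows ∧ 0 ≤ n.2 ∧ n.2 < cols) && vGet visited n.1 n.2)

-- one round: the nested comprehension rebuilding the whole matrix from the old one
def sweepB (map : List String) (visited : List (List Bool)) (rows cols : Int) :
    List (List Bool) :=
  (PySem.List.pyRange 0 rows 1).map (fun x =>
    (PySem.List.pyRange 0 cols 1).map (fun y =>
      vGet visited x y ||
        (decide (cellD map x y = 'L') && adjacent_visited visited x y rows cols)))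

-- B's `for _ in range(rows*cols): … if new == visited: break`
def jloop (map : List String) (rows cols : Int) :
    Nat → List (List Bool) → Int → Int
  | 0, _, level => level
  | fuel + 1, visited, level =>
    let new := sweepB map visited rows cols
    if new = visited then level else jloop map rows cols fuel new (level + 1)

def find_treasure_distance_alt (map : List String) : Int :=
  (PySem.List.pyRange 0 (map.length : Int) 1).foldl (fun best i =>
    (PySem.List.pyRange 0 ((map.headD "").length : Int) 1).foldl (fun best j =>
      if cellD map i j = 'L' then
        max best (jloop map (map.length : Int) ((map.headD "").length : Int)
          ((map.length : Int) * ((map.headD "").length : Int)).toNat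
          (vSet (List.replicate map.length (List.replicate (map.headD "").length false)) i j) 0)
      else best) best) 0

-- ===== PRECONDITION & SPEC =====
-- Pre_ excludes exactly the ragged maps on which Python A raises IndexError
-- (a row shorter than the first row is indexed at a column < len(map[0])).
def Pre_find_treasure_distance (map : List String) : Prop :=
  ∀ r ∈ map, (map.headD "").length ≤ r.length
instance (map : List String) : Decidable (Pre_find_treasure_distance map) := by
  unfold Pre_find_treasure_distance; infer_instance

def pvWitness_find_treasure_distance : List String := ["LLS", "LSL"]

def Spec_find_treasure_distance (map : List String) (out : Int) : Prop :=
  out = find_treasure_distance_alt map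
instance (map : List String) (out : Int) : Decidable (Spec_find_treasure_distance map out) := by
  unfold Spec_find_treasure_distance; infer_instance

-- ===== CLAIM (what is proved, stated in full; the proofs are below) =====
def Claim_equal_find_treasure_distance : Prop :=
  ∀ (map : List String), Dom_find_treasure_distance map →
    Pre_find_treasure_distance map →
    Spec_find_treasure_distance map (find_treasure_distance map)

-- ===== LEMMAS AND PROOFS =====

-- proof-side intermediate: level-synchronous frontier BFS, bridging A's queue to B's sweeps

-- visit one candidate neighbour (state: next frontier, visited)
def stepB (map : List String) (s : List (Int × Int) × List (List Bool)) (n : Int × Int) :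
    List (Int × Int) × List (List Bool) :=
  if 0 ≤ n.1 ∧ n.1 < (map.length : Int) ∧ 0 ≤ n.2 ∧ n.2 < ((map.headD "").length : Int) ∧
     cellD map n.1 n.2 = 'L' ∧ vGet s.2 n.1 n.2 = false
  then (s.1 ++ [n], vSet s.2 n.1 n.2) else s

-- one frontier cell: its four candidate neighbours
def expandCell (map : List String) (s : List (Int × Int) × List (List Bool))
    (c : Int × Int) : List (Int × Int) × List (List Bool) :=
  (nbrs c).foldl (stepB map) s

theorem stepB_cases (map : List String) :
    ∀ (s : List (Int × Int) × List (List Bool)) (n : Int × Int),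
      stepB map s n = s ∨ falseCount (stepB map s n).2 < falseCount s.2 := by
  intro s n
  unfold stepB
  split_ifs with h
  · right; exact falseCount_vSet_lt _ _ _ h.2.2.2.2.2
  · left; rfl

theorem expandCell_cases (map : List String) :
    ∀ (s : List (Int × Int) × List (List Bool)) (c : Int × Int),
      expandCell map s c = s ∨ falseCount (expandCell map s c).2 < falseCount s.2 := by
  intro s c
  exact foldl_state_cases _ (fun s2 => falseCount s2.2) (stepB_cases map) _ s

def levelLoop (map : List String) (frontier : List (Int × Int))
    (visited : List (List Bool)) (level : Int) : Int :=
  match frontier with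
  | [] => level
  | _ :: _ =>
    let s := frontier.foldl (expandCell map) ([], visited)
    levelLoop map s.1 s.2 (if s.1 = [] then level else level + 1)
termination_by (falseCount visited, frontier.length)
decreasing_by
  simp only [List.foldl_attach]
  rcases foldl_state_cases (expandCell map) (fun s2 => falseCount s2.2)
      (expandCell_cases map) frontier ([], visited) with h | h
  · rw [h]; exact Prod.Lex.right _ (by simp)
  · exact Prod.Lex.left _ _ h

-- ===== queue BFS = level-synchronous BFS (A-side bridge) =====

-- point-indexed version of A's loop body
def stepAP (map : List String) (d : Int)
    (s : List ((Int × Int) × Int) × List (List Bool)) (n : Int × Int) :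
    List ((Int × Int) × Int) × List (List Bool) :=
  if 0 ≤ n.1 ∧ n.1 < (map.length : Int) ∧ 0 ≤ n.2 ∧ n.2 < ((map.headD "").length : Int) ∧
     cellD map n.1 n.2 = 'L' ∧ vGet s.2 n.1 n.2 = false
  then (s.1 ++ [(n, d + 1)], vSet s.2 n.1 n.2) else s

theorem foldA_pts (map : List String) (c : Int × Int) (d : Int)
    (s : List ((Int × Int) × Int) × List (List Bool)) :
    dirsA.foldl (stepA map c d) s = (nbrs c).foldl (stepAP map d) s := by
  have h1 : dirsA.foldl (stepA map c d) s =
      (dirsA.map (fun dxy => (c.1 + dxy.1, c.2 + dxy.2))).foldl (stepAP map d) s := by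
    rw [List.foldl_map]; rfl
  have h2 : dirsA.map (fun dxy => (c.1 + dxy.1, c.2 + dxy.2)) = nbrs c := by
    simp [dirsA, nbrs, sub_eq_add_neg]
  rw [h1, h2]

theorem foldB_acc (map : List String) :
    ∀ (ps : List (Int × Int)) (a b : List (Int × Int)) (V : List (List Bool)),
      List.foldl (stepB map) (a ++ b, V) ps =
        (a ++ (List.foldl (stepB map) (b, V) ps).1, (List.foldl (stepB map) (b, V) ps).2) := by
  intro ps
  induction ps with
  | nil => intro a b V; simp
  | cons n t ih =>
    intro a b V
    simp only [List.foldl_cons]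
    by_cases h : 0 ≤ n.1 ∧ n.1 < (map.length : Int) ∧ 0 ≤ n.2 ∧
        n.2 < ((map.head?.getD "").length : Int) ∧ cellD map n.1 n.2 = 'L' ∧ vGet V n.1 n.2 = false
    · rw [show stepB map (a ++ b, V) n = (a ++ (b ++ [n]), vSet V n.1 n.2) by
        simp [stepB, h], show stepB map (b, V) n = (b ++ [n], vSet V n.1 n.2) by
        simp [stepB, h]]
      exact ih a (b ++ [n]) (vSet V n.1 n.2)
    · rw [show stepB map (a ++ b, V) n = (a ++ b, V) by simp [stepB, h],
          show stepB map (b, V) n = (b, V) by simp [stepB, h]]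
      exact ih a b V

theorem foldAB (map : List String) (d : Int) :
    ∀ (ps : List (Int × Int)) (q : List ((Int × Int) × Int)) (V : List (List Bool)),
      List.foldl (stepAP map d) (q, V) ps =
        (q ++ ((List.foldl (stepB map) ([], V) ps).1).map (fun n => (n, d + 1)),
         (List.foldl (stepB map) ([], V) ps).2) := by
  intro ps
  induction ps with
  | nil => intro q V; simp
  | cons n t ih =>
    intro q V
    simp only [List.foldl_cons]
    by_cases h : 0 ≤ n.1 ∧ n.1 < (map.length : Int) ∧ 0 ≤ n.2 ∧
        n.2 < ((map.head?.getD "").length : Int) ∧ cellD map n.1 n.2 = 'L' ∧ vGet V n.1 n.2 = false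
    · rw [show stepAP map d (q, V) n = (q ++ [(n, d + 1)], vSet V n.1 n.2) by
        simp [stepAP, h], show stepB map ([], V) n = ([n], vSet V n.1 n.2) by
        simp [stepB, h]]
      rw [ih (q ++ [(n, d + 1)]) (vSet V n.1 n.2),
          show ([n] : List (Int × Int)) = [n] ++ [] by simp,
          foldB_acc map t [n] [] (vSet V n.1 n.2)]
      simp
    · rw [show stepAP map d (q, V) n = (q, V) by simp [stepAP, h],
          show stepB map ([], V) n = ([], V) by simp [stepB, h]]
      exact ih q V

theorem cell_AB (map : List String) (c : Int × Int) (d : Int)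
    (q : List ((Int × Int) × Int)) (V : List (List Bool)) :
    dirsA.foldl (stepA map c d) (q, V) =
      (q ++ ((expandCell map ([], V) c).1).map (fun n => (n, d + 1)),
       (expandCell map ([], V) c).2) := by
  rw [foldA_pts]
  exact foldAB map d (nbrs c) q V

theorem frontier_acc (map : List String) :
    ∀ (f : List (Int × Int)) (a b : List (Int × Int)) (V : List (List Bool)),
      List.foldl (expandCell map) (a ++ b, V) f =
        (a ++ (List.foldl (expandCell map) (b, V) f).1,
         (List.foldl (expandCell map) (b, V) f).2) := by
  intro f
  induction f with
  | nil => intro a b V; simp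
  | cons c t ih =>
    intro a b V
    simp only [List.foldl_cons]
    have hcell : expandCell map (a ++ b, V) c =
        (a ++ (expandCell map (b, V) c).1, (expandCell map (b, V) c).2) := by
      unfold expandCell
      exact foldB_acc map _ a b V
    rw [hcell]
    have := ih a (expandCell map (b, V) c).1 (expandCell map (b, V) c).2
    simpa using this

theorem queueSim (map : List String) :
    ∀ (f : List (Int × Int)) (acc : List (Int × Int)) (V : List (List Bool)) (md d : Int),
      bfsLoop map (f.map (fun c => (c, d)) ++ acc.map (fun c => (c, d + 1))) V md =
        bfsLoop map
          ((acc ++ (List.foldl (expandCell map) ([], V) f).1).map (fun c => (c, d + 1)))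
          (List.foldl (expandCell map) ([], V) f).2
          (if f = [] then md else max md d) := by
  intro f
  induction f with
  | nil => intro acc V md d; simp
  | cons c t ih =>
    intro acc V md d
    rw [List.map_cons, List.cons_append, bfsLoop]
    rw [cell_AB]
    rw [List.append_assoc, ← List.map_append]
    rw [ih (acc ++ (expandCell map ([], V) c).1) (expandCell map ([], V) c).2 (max md d) d]
    rw [List.foldl_cons,
        show expandCell map ([], V) c =
          ((expandCell map ([], V) c).1 ++ [], (expandCell map ([], V) c).2) by simp,
        frontier_acc]
    simp only [List.append_nil, List.append_assoc]
    congr 1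
    by_cases ht : t = []
    · simp [ht]
    · rw [if_neg ht, if_neg (List.cons_ne_nil c t), max_assoc, max_self]

theorem mainSim (map : List String) :
    ∀ (n : Nat) (V : List (List Bool)), falseCount V ≤ n →
      ∀ (f : List (Int × Int)) (d md : Int), md ≤ d →
        bfsLoop map (f.map (fun c => (c, d))) V md =
          if f = [] then md else levelLoop map f V d := by
  intro n
  induction n with
  | zero =>
    intro V hV f d md hmd
    cases f with
    | nil => simp only [List.map_nil]; rw [bfsLoop]; simp
    | cons c t =>
      rw [if_neg (List.cons_ne_nil c t)]
      have hq := queueSim map (c :: t) [] V md d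
      simp only [List.map_nil, List.append_nil, List.nil_append,
        if_neg (List.cons_ne_nil c t)] at hq
      rw [max_eq_right hmd] at hq
      rw [hq, levelLoop]
      by_cases hF : (List.foldl (expandCell map) ([], V) (c :: t)).1 = []
      · rw [hF]; simp only [List.map_nil]
        rw [bfsLoop, levelLoop]; simp
      · exfalso
        rcases foldl_state_cases (expandCell map) (fun s2 => falseCount s2.2)
            (expandCell_cases map) (c :: t) ([], V) with h | h
        · exact hF (by rw [h])
        · simp only [] at h; omega
  | succ n ih =>
    intro V hV f d md hmd
    cases f with
    | nil => simp only [List.map_nil]; rw [bfsLoop]; simp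
    | cons c t =>
      rw [if_neg (List.cons_ne_nil c t)]
      have hq := queueSim map (c :: t) [] V md d
      simp only [List.map_nil, List.append_nil, List.nil_append,
        if_neg (List.cons_ne_nil c t)] at hq
      rw [max_eq_right hmd] at hq
      rw [hq, levelLoop]
      by_cases hF : (List.foldl (expandCell map) ([], V) (c :: t)).1 = []
      · rw [hF]; simp only [List.map_nil]
        rw [bfsLoop, levelLoop]; simp
      · have hlt : falseCount (List.foldl (expandCell map) ([], V) (c :: t)).2 <
            falseCount V := by
          rcases foldl_state_cases (expandCell map) (fun s2 => falseCount s2.2)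
              (expandCell_cases map) (c :: t) ([], V) with h | h
          · exact absurd (by rw [h]) hF
          · exact h
        rw [ih _ (by omega) _ (d + 1) d (by omega), if_neg hF, if_neg hF]

theorem source_eq (map : List String) (start : Int × Int) (V : List (List Bool)) :
    bfsA start map V = levelLoop map [start] (vSet V start.1 start.2) 0 := by
  unfold bfsA
  have h := mainSim map (falseCount (vSet V start.1 start.2)) _ le_rfl [start] 0 0 le_rfl
  simpa using h

-- ===== level-synchronous BFS = Jacobi sweeps (B-side bridge) =====

abbrev inRP (map : List String) (x y : Int) : Prop :=
  0 ≤ x ∧ x < (map.length : Int) ∧ 0 ≤ y ∧ y < ((map.headD "").length : Int)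

abbrev DimsP (map : List String) (V : List (List Bool)) : Prop :=
  V.length = map.length ∧ ∀ r ∈ V, r.length = (map.headD "").length

def FrontOK (map : List String) (F : List (Int × Int)) (V : List (List Bool)) : Prop :=
  ∀ c ∈ F, inRP map c.1 c.2 ∧ cellD map c.1 c.2 = 'L' ∧ vGet V c.1 c.2 = true

def ClosedP (map : List String) (F : List (Int × Int)) (V : List (List Bool)) : Prop :=
  ∀ x y : Int, inRP map x y → vGet V x y = true → (x, y) ∉ F →
    ∀ m ∈ nbrs (x, y), inRP map m.1 m.2 → cellD map m.1 m.2 = 'L' → vGet V m.1 m.2 = true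

theorem mem_nbrs_symm (c m : Int × Int) : m ∈ nbrs c ↔ c ∈ nbrs m := by
  rcases c with ⟨a, b⟩; rcases m with ⟨u, v⟩
  simp [nbrs, Prod.ext_iff]
  omega

theorem vGet_vSet (V : List (List Bool)) (a b x y : Int)
    (ha : 0 ≤ a) (hb : 0 ≤ b) (hra : a.toNat < V.length)
    (hrb : b.toNat < (V.getD a.toNat []).length) :
    vGet (vSet V a b) x y = if x = a ∧ y = b then true else vGet V x y := by
  have hset : vSet V a b = V.set a.toNat ((V.getD a.toNat []).set b.toNat true) := by
    unfold vSet; rw [if_pos ⟨ha, hb⟩]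
  rw [hset]
  unfold vGet
  by_cases hxy : 0 ≤ x ∧ 0 ≤ y
  · simp only [if_pos hxy]
    by_cases hx : x = a ∧ y = b
    · obtain ⟨h1, h2⟩ := hx; subst h1; subst h2
      simp only [and_self, if_true]
      have hrb' : y.toNat < V[x.toNat].length := by
        rwa [List.getD_eq_getElem?_getD, List.getElem?_eq_getElem hra] at hrb
      simp [List.getD_eq_getElem?_getD, hra, hrb']
    · rw [if_neg hx]
      by_cases hxa : x.toNat = a.toNat
      · have hx' : x = a := by omega
        have hyb : y.toNat ≠ b.toNat := by
          intro h
          exact hx ⟨hx', by omega⟩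
        subst hx'
        simp [List.getD_eq_getElem?_getD, hra, Ne.symm hyb]
      · simp [List.getD_eq_getElem?_getD, Ne.symm hxa]
  · simp only [if_neg hxy]
    rw [if_neg (by intro h; exact hxy ⟨h.1 ▸ ha, h.2 ▸ hb⟩)]


theorem DimsP_vSet (map : List String) (V : List (List Bool)) (a b : Int)
    (hD : DimsP map V) : DimsP map (vSet V a b) := by
  unfold vSet
  split_ifs with h
  · by_cases hlt : a.toNat < V.length
    · refine ⟨by simpa using hD.1, ?_⟩
      intro r hr
      rcases List.mem_or_eq_of_mem_set hr with h1 | h1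
      · exact hD.2 r h1
      · subst h1
        rw [List.length_set]
        apply hD.2
        rw [List.getD_eq_getElem?_getD, List.getElem?_eq_getElem hlt]
        exact List.getElem_mem hlt
    · rw [List.set_eq_of_length_le (by omega)]
      exact hD
  · exact hD


theorem vGet_replicate (map : List String) (x y : Int) (h : inRP map x y) :
    vGet (List.replicate map.length (List.replicate (map.headD "").length false)) x y = false := by
  obtain ⟨h1, h2, h3, h4⟩ := h
  unfold vGet
  rw [if_pos ⟨h1, h3⟩]
  have hx : x.toNat < map.length := by omega
  have hy : y.toNat < (map.headD "").length := by omega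
  have hy' : y.toNat < (map.head?.getD "").length := by simpa using hy
  simp [List.getD_eq_getElem?_getD, hx, hy']


theorem mat_ext (map : List String) (V W : List (List Bool))
    (hV : DimsP map V) (hW : DimsP map W)
    (h : ∀ x y : Int, inRP map x y → vGet V x y = vGet W x y) : V = W := by
  apply List.ext_getElem (by omega)
  intro i h1 h2
  apply List.ext_getElem (by rw [hV.2 _ (V.getElem_mem h1), hW.2 _ (W.getElem_mem h2)])
  intro j hj1 hj2
  have hij : inRP map (i : Int) (j : Int) := by
    have := hV.2 _ (V.getElem_mem h1)
    constructor
    · omega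
    refine ⟨by exact_mod_cast (by omega : i < map.length), by omega, ?_⟩
    have : j < (map.headD "").length := this ▸ hj1
    exact_mod_cast this
  have := h i j hij
  unfold vGet at this
  rw [if_pos ⟨Int.natCast_nonneg i, Int.natCast_nonneg j⟩] at this
  simpa [List.getD_eq_getElem?_getD, List.getElem?_eq_getElem, h1, h2, hj1, hj2,
    Int.toNat_natCast] using this


theorem sweep_dims (map : List String) (V : List (List Bool)) :
    DimsP map (sweepB map V (map.length : Int) ((map.headD "").length : Int)) := by
  unfold sweepB
  constructor
  · simp [PySem.List.length_pyRange_one]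
  · intro r hr
    rcases List.mem_map.mp hr with ⟨x, _, rfl⟩
    simp [PySem.List.length_pyRange_one]


theorem vGet_sweep (map : List String) (V : List (List Bool)) (x y : Int)
    (h : inRP map x y) :
    vGet (sweepB map V (map.length : Int) ((map.headD "").length : Int)) x y =
      (vGet V x y || (decide (cellD map x y = 'L') &&
        adjacent_visited V x y (map.length : Int) ((map.headD "").length : Int))) := by
  obtain ⟨h1, h2, h3, h4⟩ := h
  conv_lhs => rw [vGet]
  rw [if_pos ⟨h1, h3⟩]
  unfold sweepB
  rw [PySem.List.pyRange_one, PySem.List.pyRange_one]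
  have hx : x.toNat < (((map.length : Int) - 0).toNat) := by omega
  have hy : y.toNat < ((((map.headD "").length : Int) - 0).toNat) := by omega
  rw [List.map_map, PySem.List.getD_map_range _ _ _ _ hx]
  simp only [Function.comp_apply]
  rw [List.map_map, PySem.List.getD_map_range _ _ _ _ hy]
  simp only [Function.comp_apply]
  have hxx : (0 : Int) + ↑x.toNat = x := by omega
  have hyy : (0 : Int) + ↑y.toNat = y := by omega
  rw [hxx, hyy]


theorem any_nbrs_eq (c : Int × Int) (x y : Int) :
    ((nbrs c).any fun n => decide (n.1 = x ∧ n.2 = y)) = decide ((x, y) ∈ nbrs c) := by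
  rcases c with ⟨a, b⟩
  simp [nbrs, Prod.ext_iff, eq_comm]


theorem foldB_char (map : List String) (ns : List (Int × Int)) :
    ∀ (acc : List (Int × Int)) (V : List (List Bool)), DimsP map V →
      DimsP map (ns.foldl (stepB map) (acc, V)).2 ∧
      (∀ x y : Int, vGet (ns.foldl (stepB map) (acc, V)).2 x y =
        (vGet V x y || (ns.any (fun n => decide (n.1 = x ∧ n.2 = y)) &&
          decide (inRP map x y) && decide (cellD map x y = 'L')))) ∧
      (∀ m : Int × Int, m ∈ (ns.foldl (stepB map) (acc, V)).1 ↔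
        (m ∈ acc ∨ (m ∈ ns ∧ inRP map m.1 m.2 ∧ cellD map m.1 m.2 = 'L' ∧
          vGet V m.1 m.2 = false))) := by
  induction ns with
  | nil =>
    intro acc V hD
    refine ⟨hD, by simp, by simp⟩
  | cons n t ih =>
    intro acc V hD
    by_cases hc : 0 ≤ n.1 ∧ n.1 < (map.length : Int) ∧ 0 ≤ n.2 ∧
        n.2 < ((map.headD "").length : Int) ∧ cellD map n.1 n.2 = 'L' ∧ vGet V n.1 n.2 = false
    · have hstep : stepB map (acc, V) n = (acc ++ [n], vSet V n.1 n.2) := by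
        unfold stepB
        exact if_pos hc
      have hra : n.1.toNat < V.length := by
        have := hD.1; omega
      have hrb : n.2.toNat < (V.getD n.1.toNat []).length := by
        have hrow : (V.getD n.1.toNat []).length = (map.headD "").length := by
          apply hD.2
          rw [List.getD_eq_getElem?_getD, List.getElem?_eq_getElem hra]
          exact List.getElem_mem hra
        omega
      have hvs : ∀ x y : Int, vGet (vSet V n.1 n.2) x y =
          if x = n.1 ∧ y = n.2 then true else vGet V x y :=
        fun x y => vGet_vSet V n.1 n.2 x y hc.1 hc.2.2.1 hra hrb
      obtain ⟨ihD, ihG, ihM⟩ := ih (acc ++ [n]) (vSet V n.1 n.2) (DimsP_vSet map V _ _ hD)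
      rw [List.foldl_cons, hstep]
      refine ⟨ihD, ?_, ?_⟩
      · intro x y
        rw [ihG x y, hvs x y]
        by_cases hxy : x = n.1 ∧ y = n.2
        · obtain ⟨hx1, hy1⟩ := hxy; subst hx1; subst hy1
          rw [if_pos ⟨rfl, rfl⟩]
          have h1 : decide (inRP map n.1 n.2) = true := by
            simp only [decide_eq_true_eq]; exact ⟨hc.1, hc.2.1, hc.2.2.1, hc.2.2.2.1⟩
          have h2 : decide (cellD map n.1 n.2 = 'L') = true := by
            simp only [decide_eq_true_eq]; exact hc.2.2.2.2.1
          simp [hc.2.2.2.2.2, h1, h2]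
        · rw [if_neg hxy]
          have hd : decide (n.1 = x ∧ n.2 = y) = false := by
            simp only [decide_eq_false_iff_not]
            intro h; exact hxy ⟨h.1.symm, h.2.symm⟩
          simp only [List.any_cons, hd, Bool.false_or]
      · intro m
        rw [ihM m]
        constructor
        · rintro (hm | ⟨hmt, hin, hl, hv⟩)
          · rcases List.mem_append.mp hm with hm | hm
            · exact Or.inl hm
            · right
              have hmn : m = n := by simpa using hm
              subst hmn
              exact ⟨List.mem_cons_self .., ⟨hc.1, hc.2.1, hc.2.2.1, hc.2.2.2.1⟩,
                hc.2.2.2.2.1, hc.2.2.2.2.2⟩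
          · right
            have hmn : ¬(m.1 = n.1 ∧ m.2 = n.2) := by
              intro h
              rw [hvs m.1 m.2, if_pos h] at hv
              exact absurd hv (by simp)
            refine ⟨List.mem_cons_of_mem _ hmt, hin, hl, ?_⟩
            rw [hvs m.1 m.2, if_neg hmn] at hv
            exact hv
        · rintro (hm | ⟨hmt, hin, hl, hv⟩)
          · exact Or.inl (List.mem_append.mpr (Or.inl hm))
          · rcases List.mem_cons.mp hmt with hmn | hmt
            · subst hmn
              exact Or.inl (List.mem_append.mpr (Or.inr (by simp)))
            · by_cases hmn : m.1 = n.1 ∧ m.2 = n.2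
              · left
                apply List.mem_append.mpr
                right
                have : m = n := Prod.ext_iff.mpr hmn
                simp [this]
              · right
                refine ⟨hmt, hin, hl, ?_⟩
                rw [hvs m.1 m.2, if_neg hmn]
                exact hv
    · have hstep : stepB map (acc, V) n = (acc, V) := by
        unfold stepB
        exact if_neg hc
      obtain ⟨ihD, ihG, ihM⟩ := ih acc V hD
      rw [List.foldl_cons, hstep]
      refine ⟨ihD, ?_, ?_⟩
      · intro x y
        rw [ihG x y]
        by_cases hxy : x = n.1 ∧ y = n.2
        · obtain ⟨hx1, hy1⟩ := hxy; subst hx1; subst hy1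
          by_cases hIL : inRP map n.1 n.2 ∧ cellD map n.1 n.2 = 'L'
          · have hvt : vGet V n.1 n.2 = true := by
              rcases Bool.eq_false_or_eq_true (vGet V n.1 n.2) with ht | hf
              · exact ht
              · exact absurd ⟨hIL.1.1, hIL.1.2.1, hIL.1.2.2.1, hIL.1.2.2.2, hIL.2, hf⟩ hc
            simp [hvt]
          · rcases not_and_or.mp hIL with hI | hL
            · simp [hI]
            · simp [hL]
        · have hd : decide (n.1 = x ∧ n.2 = y) = false := by
            simp only [decide_eq_false_iff_not]
            intro h; exact hxy ⟨h.1.symm, h.2.symm⟩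
          simp only [List.any_cons, hd, Bool.false_or]
      · intro m
        rw [ihM m]
        constructor
        · rintro (hm | ⟨hmt, rest⟩)
          · exact Or.inl hm
          · exact Or.inr ⟨List.mem_cons_of_mem _ hmt, rest⟩
        · rintro (hm | ⟨hmt, hin, hl, hv⟩)
          · exact Or.inl hm
          · rcases List.mem_cons.mp hmt with hmn | hmt
            · subst hmn
              exact absurd ⟨hin.1, hin.2.1, hin.2.2.1, hin.2.2.2, hl, hv⟩ hc
            · exact Or.inr ⟨hmt, hin, hl, hv⟩


theorem foldF_char (map : List String) (F : List (Int × Int)) :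
    ∀ (acc : List (Int × Int)) (V : List (List Bool)), DimsP map V →
      DimsP map (F.foldl (expandCell map) (acc, V)).2 ∧
      (∀ x y : Int, vGet (F.foldl (expandCell map) (acc, V)).2 x y =
        (vGet V x y || (F.any (fun c => decide ((x, y) ∈ nbrs c)) &&
          decide (inRP map x y) && decide (cellD map x y = 'L')))) ∧
      (∀ m : Int × Int, m ∈ (F.foldl (expandCell map) (acc, V)).1 ↔
        (m ∈ acc ∨ (inRP map m.1 m.2 ∧ cellD map m.1 m.2 = 'L' ∧ vGet V m.1 m.2 = false ∧
          ∃ c ∈ F, m ∈ nbrs c))) := by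
  induction F with
  | nil =>
    intro acc V hD
    refine ⟨hD, by simp, by simp⟩
  | cons c F ih =>
    intro acc V hD
    obtain ⟨cD, cG, cM⟩ := foldB_char map (nbrs c) acc V hD
    rw [List.foldl_cons]
    have hEC : expandCell map (acc, V) c = (nbrs c).foldl (stepB map) (acc, V) := rfl
    rw [hEC]
    set s1 := (nbrs c).foldl (stepB map) (acc, V) with hs1
    have hsp : s1 = (s1.1, s1.2) := rfl
    obtain ⟨ihD, ihG, ihM⟩ := ih s1.1 s1.2 cD
    rw [hsp]
    refine ⟨ihD, ?_, ?_⟩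
    · intro x y
      rw [ihG x y, cG x y]
      rw [any_nbrs_eq c x y, List.any_cons]
      by_cases hin : inRP map x y
      · by_cases hl : cellD map x y = 'L'
        · simp [hin, hl, Bool.or_assoc, Bool.and_or_distrib_right]
        · simp [hl]
      · simp [hin]
    · intro m
      rw [ihM m, cM m]
      constructor
      · rintro (hm | ⟨hin, hl, hv, cw, hcw, hmn⟩)
        · rcases hm with hm | ⟨hmnb, hin, hl, hv⟩
          · exact Or.inl hm
          · exact Or.inr ⟨hin, hl, hv, c, List.mem_cons_self .., hmnb⟩
        · right
          rw [cG m.1 m.2] at hv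
          rcases Bool.or_eq_false_iff.mp hv with ⟨hv1, _⟩
          exact ⟨hin, hl, hv1, cw, List.mem_cons_of_mem _ hcw, hmn⟩
      · rintro (hm | ⟨hin, hl, hv, cw, hcw, hmn⟩)
        · exact Or.inl (Or.inl hm)
        · rcases List.mem_cons.mp hcw with hcw | hcw
          · subst hcw
            exact Or.inl (Or.inr ⟨hmn, hin, hl, hv⟩)
          · by_cases hv1 : vGet s1.2 m.1 m.2 = false
            · exact Or.inr ⟨hin, hl, hv1, cw, hcw, hmn⟩
            · left
              right
              rw [cG m.1 m.2, hv, Bool.false_or] at hv1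
              have hv2 : ((nbrs c).any fun n => decide (n.1 = m.1 ∧ n.2 = m.2)) = true := by
                rcases Bool.eq_false_or_eq_true
                    ((nbrs c).any fun n => decide (n.1 = m.1 ∧ n.2 = m.2)) with ht | hf
                · exact ht
                · rw [hf] at hv1; simp at hv1
              rw [any_nbrs_eq c m.1 m.2] at hv2
              have : (m.1, m.2) ∈ nbrs c := of_decide_eq_true hv2
              exact ⟨this, hin, hl, hv⟩


theorem flip_iff (map : List String) (F : List (Int × Int)) (V : List (List Bool))
    (hF : FrontOK map F V) (hC : ClosedP map F V) (x y : Int)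
    (hin : inRP map x y) (hland : cellD map x y = 'L') (hunvis : vGet V x y = false) :
    (F.any fun c => decide ((x, y) ∈ nbrs c)) =
      adjacent_visited V x y (map.length : Int) ((map.headD "").length : Int) := by
  unfold adjacent_visited
  rw [Bool.eq_iff_iff]
  simp only [List.any_eq_true, decide_eq_true_eq, Bool.and_eq_true]
  constructor
  · rintro ⟨c, hcF, hmem⟩
    refine ⟨c, (mem_nbrs_symm c (x, y)).mp hmem, ?_⟩
    obtain ⟨hinc, _, hvc⟩ := hF c hcF
    exact ⟨hinc, hvc⟩
  · rintro ⟨n, hn, hinn, hvn⟩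
    by_cases hnF : n ∈ F
    · exact ⟨n, hnF, (mem_nbrs_symm (x, y) n).mp hn⟩
    · exfalso
      have hxy : (x, y) ∈ nbrs (n.1, n.2) := by
        rw [← mem_nbrs_symm]
        simpa using hn
      have := hC n.1 n.2 hinn hvn (by simpa using hnF)
        (x, y) hxy hin hland
      rw [this] at hunvis
      exact absurd hunvis (by simp)


theorem simLoop (map : List String) :
    ∀ (n : Nat) (F : List (Int × Int)) (V : List (List Bool)) (level : Int),
      DimsP map V → FrontOK map F V → ClosedP map F V → falseCount V < n →
      levelLoop map F V level =
        jloop map (map.length : Int) ((map.headD "").length : Int) n V level := by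
  intro n
  induction n with
  | zero => intro F V level _ _ _ hfc; omega
  | succ k ih =>
    intro F V level hD hF hC hfc
    cases F with
    | nil =>
      have hfix : sweepB map V (map.length : Int) ((map.headD "").length : Int) = V := by
        apply mat_ext _ _ _ (sweep_dims map V) hD
        intro x y hin
        rw [vGet_sweep map V x y hin]
        by_cases hv : vGet V x y = true
        · simp [hv]
        · have hv' : vGet V x y = false := by simpa using hv
          by_cases hl : cellD map x y = 'L'
          · have hadj := flip_iff map [] V hF hC x y hin hl hv'
            simp only [List.any_nil] at hadj
            rw [hv', ← hadj]
            simp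
          · simp [hv', hl]
      rw [levelLoop]
      simp only [jloop]
      rw [if_pos hfix]
    | cons c F0 =>
      obtain ⟨sD, sG, sM⟩ := foldF_char map (c :: F0) [] V hD
      have hmat : (List.foldl (expandCell map) ([], V) (c :: F0)).2 =
          sweepB map V (map.length : Int) ((map.headD "").length : Int) := by
        apply mat_ext _ _ _ sD (sweep_dims map V)
        intro x y hin
        rw [sG x y, vGet_sweep map V x y hin]
        by_cases hv : vGet V x y = true
        · simp [hv]
        · have hv' : vGet V x y = false := by simpa using hv
          by_cases hl : cellD map x y = 'L'
          · have hadj := flip_iff map (c :: F0) V hF hC x y hin hl hv'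
            rw [hv', hadj, decide_eq_true hin, decide_eq_true hl]
            simp [Bool.and_comm]
          · simp [hv', hl]
      rw [levelLoop]
      simp only [jloop]
      by_cases hfix : sweepB map V (map.length : Int) ((map.headD "").length : Int) = V
      · have hs1 : (List.foldl (expandCell map) ([], V) (c :: F0)).1 = [] := by
          rw [List.eq_nil_iff_forall_not_mem]
          intro m hm
          rcases (sM m).mp hm with hm0 | ⟨hin, hl, hv, cw, hcw, hmn⟩
          · simp at hm0
          · have hany : ((c :: F0).any fun c0 => decide ((m.1, m.2) ∈ nbrs c0)) = true :=
              List.any_eq_true.mpr ⟨cw, hcw, decide_eq_true (by simpa using hmn)⟩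
            have hvt : vGet (List.foldl (expandCell map) ([], V) (c :: F0)).2 m.1 m.2 = true := by
              rw [sG m.1 m.2, hany, decide_eq_true hin, decide_eq_true hl]
              simp
            rw [hmat, hfix] at hvt
            rw [hvt] at hv
            exact absurd hv (by simp)
        rw [hs1]
        simp only [reduceIte]
        rw [levelLoop, if_pos hfix]
      · have hs1ne : (List.foldl (expandCell map) ([], V) (c :: F0)).1 ≠ [] := by
          intro h0
          apply hfix
          rw [← hmat]
          apply mat_ext _ _ _ sD hD
          intro x y hin
          rw [sG x y]
          by_cases hv : vGet V x y = true
          · simp [hv]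
          · have hv' : vGet V x y = false := by simpa using hv
            have hnm : (((c :: F0).any fun c0 => decide ((x, y) ∈ nbrs c0)) &&
                decide (inRP map x y) && decide (cellD map x y = 'L')) = false := by
              rcases Bool.eq_false_or_eq_true (((c :: F0).any fun c0 => decide ((x, y) ∈ nbrs c0)) &&
                  decide (inRP map x y) && decide (cellD map x y = 'L')) with hb | hb
              case inr => exact hb
              · exfalso
                rcases Bool.and_eq_true_iff.mp hb with ⟨hb1, hb2⟩
                rcases Bool.and_eq_true_iff.mp hb1 with ⟨hany, _⟩
                rcases List.any_eq_true.mp hany with ⟨cw, hcw, hmem⟩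
                have hxy : (x, y) ∈ (List.foldl (expandCell map) ([], V) (c :: F0)).1 :=
                  (sM (x, y)).mpr (Or.inr ⟨hin, of_decide_eq_true hb2, hv',
                    cw, hcw, of_decide_eq_true hmem⟩)
                rw [h0] at hxy
                simp at hxy
            rw [hnm]
            simp [hv']
        have hlt : falseCount (List.foldl (expandCell map) ([], V) (c :: F0)).2 <
            falseCount V := by
          rcases foldl_state_cases (expandCell map) (fun s2 => falseCount s2.2)
              (expandCell_cases map) (c :: F0) ([], V) with h | h
          · exact absurd (by rw [h]) hs1ne
          · exact h
        have hF' : FrontOK map (List.foldl (expandCell map) ([], V) (c :: F0)).1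
            (List.foldl (expandCell map) ([], V) (c :: F0)).2 := by
          intro m hm
          rcases (sM m).mp hm with hm0 | ⟨hin, hl, hv, cw, hcw, hmn⟩
          · simp at hm0
          · refine ⟨hin, hl, ?_⟩
            have hany : ((c :: F0).any fun c0 => decide ((m.1, m.2) ∈ nbrs c0)) = true :=
              List.any_eq_true.mpr ⟨cw, hcw, decide_eq_true (by simpa using hmn)⟩
            rw [sG m.1 m.2, hany, decide_eq_true hin, decide_eq_true hl]
            simp
        have hC' : ClosedP map (List.foldl (expandCell map) ([], V) (c :: F0)).1
            (List.foldl (expandCell map) ([], V) (c :: F0)).2 := by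
          intro x y hin hvis hnot m hmnb hinm hlm
          rw [sG m.1 m.2]
          by_cases hvm : vGet V m.1 m.2 = true
          · simp [hvm]
          · rw [sG x y] at hvis
            by_cases hvx : vGet V x y = true
            · by_cases hxF : (x, y) ∈ c :: F0
              · have hany : ((c :: F0).any fun c0 => decide ((m.1, m.2) ∈ nbrs c0)) = true :=
                  List.any_eq_true.mpr ⟨(x, y), hxF, decide_eq_true (by simpa using hmnb)⟩
                rw [hany, decide_eq_true hinm, decide_eq_true hlm]
                simp
              · have := hC x y hin hvx hxF m hmnb hinm hlm
                exact absurd this hvm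
            · have hvx' : vGet V x y = false := by simpa using hvx
              rw [hvx', Bool.false_or] at hvis
              rcases Bool.and_eq_true_iff.mp hvis with ⟨hb1, hb2⟩
              rcases Bool.and_eq_true_iff.mp hb1 with ⟨hany, _⟩
              rcases List.any_eq_true.mp hany with ⟨cw, hcw, hmem⟩
              have hxy : (x, y) ∈ (List.foldl (expandCell map) ([], V) (c :: F0)).1 :=
                (sM (x, y)).mpr (Or.inr ⟨hin, of_decide_eq_true hb2, hvx',
                  cw, hcw, of_decide_eq_true hmem⟩)
              exact absurd hxy hnot
        rw [if_neg hs1ne, if_neg hfix]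
        rw [ih _ _ (level + 1) sD hF' hC' (by omega), hmat]


theorem falseCount_replicate (map : List String) :
    falseCount (List.replicate map.length (List.replicate (map.headD "").length false)) =
      map.length * (map.headD "").length := by
  simp [falseCount]


theorem source_sweep (map : List String) (i j : Int)
    (hin : inRP map i j) (hland : cellD map i j = 'L') :
    levelLoop map [(i, j)]
        (vSet (List.replicate map.length (List.replicate (map.headD "").length false)) i j) 0 =
      jloop map (map.length : Int) ((map.headD "").length : Int)
        ((map.length : Int) * ((map.headD "").length : Int)).toNat
        (vSet (List.replicate map.length (List.replicate (map.headD "").length false)) i j) 0 := by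
  obtain ⟨hq1, hq2, hq3, hq4⟩ := hin
  have hin : inRP map i j := ⟨hq1, hq2, hq3, hq4⟩
  set Z := List.replicate map.length (List.replicate (map.headD "").length false) with hZ
  have hDZ : DimsP map Z := by
    constructor
    · simp [hZ]
    · intro r hr
      have := List.eq_of_mem_replicate hr
      simp [this]
  have hra : i.toNat < Z.length := by
    rw [hZ, List.length_replicate]
    omega
  have hrb : j.toNat < (Z.getD i.toNat []).length := by
    rw [hZ, List.getD_eq_getElem?_getD, List.getElem?_replicate,
        if_pos (by omega : i.toNat < map.length)]
    rw [Option.getD_some, List.length_replicate]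
    omega
  have hvs : ∀ x y : Int, vGet (vSet Z i j) x y =
      if x = i ∧ y = j then true else vGet Z x y :=
    fun x y => vGet_vSet Z i j x y hin.1 hin.2.2.1 hra hrb
  apply simLoop
  · exact DimsP_vSet map Z i j hDZ
  · intro c hc
    have hc' : c = (i, j) := by simpa using hc
    subst hc'
    refine ⟨hin, hland, ?_⟩
    rw [show ((i, j) : Int × Int).1 = i from rfl, show ((i, j) : Int × Int).2 = j from rfl,
        hvs i j, if_pos ⟨rfl, rfl⟩]
  · intro x y hxy hvis hnot m hm hinm hlm
    exfalso
    have hne : ¬(x = i ∧ y = j) := by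
      intro h
      exact hnot (by simp [h.1, h.2])
    rw [hvs x y, if_neg hne, vGet_replicate map x y hxy] at hvis
    exact absurd hvis (by simp)
  · have h1 : falseCount Z = map.length * (map.headD "").length := falseCount_replicate map
    have h2 : falseCount (vSet Z i j) < falseCount Z :=
      falseCount_vSet_lt Z i j (by rw [vGet_replicate map i j hin])
    have h3 : ((map.length : Int) * ((map.headD "").length : Int)).toNat =
        map.length * (map.headD "").length := by
      rw [← Nat.cast_mul, Int.toNat_natCast]
    omega


-- ===== VERDICT =====

theorem find_treasure_distance_spec : Claim_equal_find_treasure_distance := by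
  unfold Claim_equal_find_treasure_distance
  intro map _ _
  unfold Spec_find_treasure_distance find_treasure_distance find_treasure_distance_alt
  apply PySem.List.foldl_congr_mem
  intro md i hi
  apply PySem.List.foldl_congr_mem
  intro acc j hj
  by_cases hl : cellD map i j = 'L'
  · rw [if_pos hl, if_pos hl]
    congr 1
    rw [source_eq]
    exact source_sweep map i j
      ⟨(PySem.List.mem_pyRange_one.mp hi).1, (PySem.List.mem_pyRange_one.mp hi).2,
       (PySem.List.mem_pyRange_one.mp hj).1, (PySem.List.mem_pyRange_one.mp hj).2⟩ hl
  · rw [if_neg hl, if_neg hl]
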